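-- pv_equiv track=rewrite | github.com/leolulu/siyuan-mcp-server | src/siyuan_mcp_server/__init__.py | _collect_subtree_ids
-- ===== SOURCE A (Python) =====
-- from typing import Any, Dict, List, Optional, Tuple
--
-- def _collect_subtree_ids(
--     block_id: str, children_index: Dict[str, List[str]]
-- ) -> List[str]:
--     ordered: List[str] = []
--     stack: List[str] = [block_id]
--     visited = set()
--
--     while stack:
--         current = stack.pop()
--         if current in visited:
--             continue
--         visited.add(current)
--         ordered.append(current)
--
--         children = children_index.get(current, [])
--         for child in reversed(children):
--             stack.append(child)
--
--     return ordered
-- ===== SOURCE B (Python) =====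
-- from typing import Any, Dict, List, Optional, Tuple
--
-- def _collect_subtree_ids(
--     block_id: str, children_index: Dict[str, List[str]]
-- ) -> List[str]:
--     ordered: List[str] = []
--     visited = set()
--
--     def dfs(node: str) -> None:
--         if node in visited:
--             return
--         visited.add(node)
--         ordered.append(node)
--         for child in children_index.get(node, []):
--             dfs(child)
--
--     dfs(block_id)
--     return ordered
-- ===== Notes on version B (the rewrite author's own statement) =====
-- stated objective: alternative
-- what changed: Replaced A's iterative explicit-stack loop (pushing reversed children and checking visited at pop time) by a recursive preorder DFS helper with a shared visited set and result list, recursing over children in forward order.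
import Mathlib
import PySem

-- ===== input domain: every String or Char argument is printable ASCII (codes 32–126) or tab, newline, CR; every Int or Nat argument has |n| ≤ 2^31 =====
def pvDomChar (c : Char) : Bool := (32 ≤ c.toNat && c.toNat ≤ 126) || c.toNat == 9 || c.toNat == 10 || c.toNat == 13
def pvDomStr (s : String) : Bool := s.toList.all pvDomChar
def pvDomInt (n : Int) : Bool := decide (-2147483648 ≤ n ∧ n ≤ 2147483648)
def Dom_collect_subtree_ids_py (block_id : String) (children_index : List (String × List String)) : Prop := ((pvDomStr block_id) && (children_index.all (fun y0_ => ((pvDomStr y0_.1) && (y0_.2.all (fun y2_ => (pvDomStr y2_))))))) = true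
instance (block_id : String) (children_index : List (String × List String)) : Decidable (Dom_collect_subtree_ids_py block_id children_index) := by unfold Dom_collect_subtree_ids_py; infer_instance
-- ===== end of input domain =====

-- B replaces A's explicit-stack loop by a recursive preorder DFS with a shared visited
-- set (objective: alternative decomposition, same output and asymptotic cost).

-- ===== PORT A =====
-- A's while-loop over the stack (stack modelled top-first, so 'stack.append' = cons and
-- 'stack.pop()' = head; the 'for child in reversed(children): stack.append(child)' is the
-- foldl over children.reverse).  The fuel argument is only a totality guard: the loop pops
-- at most 1 + (total number of child entries) times, so the fuel chosen below never runs out.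
def pvLoopA (ci : List (String × List String)) :
    Nat → List String → PySem.Set String → List String → List String
  | _, [], _, ordered => ordered
  | 0, _ :: _, _, ordered => ordered
  | fuel + 1, current :: rest, visited, ordered =>
    if PySem.Set.contains visited current then
      pvLoopA ci fuel rest visited ordered
    else
      let children := ((ci.lookup current).getD [])
      pvLoopA ci fuel (children.reverse.foldl (fun st c => c :: st) rest)
        (PySem.Set.add visited current) (ordered ++ [current])

def collect_subtree_ids_py (block_id : String) (children_index : List (String × List String)) : List String :=
  pvLoopA children_index (1 + (children_index.flatMap Prod.snd).length)
    [block_id] PySem.Set.empty []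

-- ===== PORT B =====
-- B's recursive dfs, fused with its for-loop over the children: processing a sibling list
-- node :: siblings = dfs(node) then the remaining siblings.  State = (visited, ordered),
-- threaded through the calls.  Fuel is again only a totality guard (one unit per dfs call,
-- exactly mirroring one unit per pop in pvLoopA); the subtype records that a call returns
-- at most the fuel it was given, which justifies termination.
def pvDfsB (ci : List (String × List String)) :
    (fuel : Nat) → List String → PySem.Set String × List String →
      {p : Nat × PySem.Set String × List String // p.1 ≤ fuel}
  | fuel, [], st => ⟨(fuel, st), Nat.le_refl _⟩
  | 0, _ :: _, st => ⟨(0, st), Nat.le_refl _⟩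
  | fuel + 1, node :: siblings, (visited, ordered) =>
    if PySem.Set.contains visited node then
      let r := pvDfsB ci fuel siblings (visited, ordered)
      ⟨r.val, Nat.le_trans r.property (Nat.le_succ _)⟩
    else
      match pvDfsB ci fuel (((ci.lookup node).getD []))
          (PySem.Set.add visited node, ordered ++ [node]) with
      | ⟨(fuel1, st1), h1⟩ =>
        let r2 := pvDfsB ci fuel1 siblings st1
        ⟨r2.val, Nat.le_trans r2.property (Nat.le_trans h1 (Nat.le_succ _))⟩
  termination_by fuel _ _ => fuel
  decreasing_by
  · exact Nat.lt_succ_self _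
  · exact Nat.lt_succ_self _
  · exact Nat.lt_succ_of_le h1

def collect_subtree_ids_py_alt (block_id : String) (children_index : List (String × List String)) : List String :=
  ((pvDfsB children_index (1 + (children_index.flatMap Prod.snd).length)
    [block_id] (PySem.Set.empty, [])).val.2.2)

-- ===== PRECONDITION & SPEC =====
def Spec_collect_subtree_ids_py (block_id : String) (children_index : List (String × List String)) (out : List String) : Prop := out = collect_subtree_ids_py_alt block_id children_index
instance (block_id : String) (children_index : List (String × List String)) (out : List String) : Decidable (Spec_collect_subtree_ids_py block_id children_index out) := by unfold Spec_collect_subtree_ids_py; infer_instance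

-- ===== CLAIM (what is proved, stated in full; the proofs are below) =====
def Claim_equal_collect_subtree_ids_py : Prop := ∀ (block_id : String) (children_index : List (String × List String)), Dom_collect_subtree_ids_py block_id children_index → Spec_collect_subtree_ids_py block_id children_index (collect_subtree_ids_py block_id children_index)

-- ===== LEMMAS AND PROOFS =====

-- pushing the reversed children one by one is appending them in order
theorem pvPush_eq_append (children rest : List String) :
    children.reverse.foldl (fun st c => c :: st) rest = children ++ rest := by
  induction children generalizing rest with
  | nil => rfl
  | cons c cs ih => simp [List.foldl_append, ih]

-- the stack loop on 'ns ++ rest' first performs exactly B's dfs over 'ns'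
-- (with the same fuel accounting), then continues on 'rest'
theorem pvLoopA_eq_dfs (ci : List (String × List String)) (fuel : Nat)
    (ns : List String) (st : PySem.Set String × List String) :
    ∀ rest : List String,
      pvLoopA ci fuel (ns ++ rest) st.1 st.2 =
        pvLoopA ci (pvDfsB ci fuel ns st).val.1 rest
          (pvDfsB ci fuel ns st).val.2.1 (pvDfsB ci fuel ns st).val.2.2 := by
  fun_induction pvDfsB ci fuel ns st with
  | case1 fuel st => intro rest; rfl
  | case2 n ns st => intro rest; cases rest <;> rfl
  | case3 fuel node siblings visited ordered hmem r ih =>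
    intro rest
    simp only [List.cons_append, pvLoopA, hmem]
    exact ih rest
  | case4 fuel node siblings visited ordered hmem fuel1 st1 h1 heq ihlet ihchildren ihsiblings =>
    intro rest
    have hA := ihchildren (siblings ++ rest)
    rw [heq] at hA
    simp only [List.cons_append, pvLoopA, hmem, pvPush_eq_append]
    rw [hA]
    simpa using ihsiblings rest

-- ===== VERDICT (by name: the statement is the Claim_ definition above) =====
theorem collect_subtree_ids_py_spec : Claim_equal_collect_subtree_ids_py := by
  intro block_id ci _
  unfold Spec_collect_subtree_ids_py collect_subtree_ids_py collect_subtree_ids_py_alt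
  have h := pvLoopA_eq_dfs ci (1 + (ci.flatMap Prod.snd).length) [block_id]
    (PySem.Set.empty, ([] : List String)) []
  simpa [pvLoopA] using h
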